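-- pv_equiv track=rewrite | github.com/liquid-releasing/funscript-updater | tests/test_export_integrity.py | _clamp_sort_dedup
-- ===== SOURCE A (Python) =====
-- def _clamp_sort_dedup(actions: list) -> int:
--     """Local mirror of export_panel._clamp_sort_dedup for testing without Streamlit."""
--     actions.sort(key=lambda a: a["at"])
--     seen: dict = {}
--     for a in actions:
--         seen[a["at"]] = a["pos"]
--     actions[:] = [{"at": t, "pos": p} for t, p in seen.items()]
--     clamp_count = 0
--     for a in actions:
--         clamped = max(0, min(100, a["pos"]))
--         if clamped != a["pos"]:
--             clamp_count += 1
--             a["pos"] = clamped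
--     return clamp_count
-- ===== SOURCE B (Python) =====
-- from itertools import groupby
--
--
-- def _clamp_sort_dedup(actions: list) -> int:
--     """Sort by time, dedup by grouping the sorted runs (last wins), clamp, count clamps."""
--     actions.sort(key=lambda a: a["at"])
--     deduped = []
--     for t, grp in groupby(actions, key=lambda a: a["at"]):
--         last = None
--         for last in grp:
--             pass
--         deduped.append({"at": t, "pos": last["pos"]})
--     actions[:] = deduped
--     clamp_count = 0
--     for a in actions:
--         p = a["pos"]
--         if p < 0 or p > 100:
--             clamp_count += 1
--             a["pos"] = 0 if p < 0 else 100
--     return clamp_count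
-- ===== Notes on version B (the rewrite author's own statement) =====
-- stated objective: idiomatic
-- what changed: The dict-based last-wins dedup and rebuild is replaced by an itertools.groupby scan of the sorted list that keeps each run's last element, with the clamp pass testing the range directly.
import Mathlib
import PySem

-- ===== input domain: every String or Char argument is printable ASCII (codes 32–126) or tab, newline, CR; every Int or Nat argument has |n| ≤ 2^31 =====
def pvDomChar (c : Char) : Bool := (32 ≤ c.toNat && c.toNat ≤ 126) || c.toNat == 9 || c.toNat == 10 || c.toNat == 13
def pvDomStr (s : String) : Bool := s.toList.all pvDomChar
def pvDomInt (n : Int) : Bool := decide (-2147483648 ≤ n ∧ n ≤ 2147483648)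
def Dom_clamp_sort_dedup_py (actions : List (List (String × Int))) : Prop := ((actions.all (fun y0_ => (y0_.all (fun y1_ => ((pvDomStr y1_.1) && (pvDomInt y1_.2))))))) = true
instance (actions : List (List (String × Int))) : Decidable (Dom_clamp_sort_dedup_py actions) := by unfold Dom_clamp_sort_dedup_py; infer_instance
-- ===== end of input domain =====

-- B replaces A's hash-map dedup with a groupby-style single scan over the sorted list (idiomatic itertools.groupby form).
-- A mutates `actions` in place; B performs the same in-place mutation, and the equivalence proved here is about the return value.


-- shared accessors: a["at"] / a["pos"] — exact where the key is present (guaranteed by Pre_; Python raises KeyError otherwise)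
def pvAt (a : List (String × Int)) : Int := (PySem.Dict.mk a).getD "at" 0
def pvPos (a : List (String × Int)) : Int := (PySem.Dict.mk a).getD "pos" 0

-- ===== PORT A =====
def clamp_sort_dedup_py (actions : List (List (String × Int))) : Int :=
  let sortedA := PySem.List.sorted actions (fun a => pvAt a) false
  let seen : PySem.Dict Int Int :=
    sortedA.foldl (fun d a => d.insert (pvAt a) (pvPos a)) PySem.Dict.empty
  let actions2 := seen.items.map (fun tp => [("at", tp.1), ("pos", tp.2)])
  actions2.foldl (fun clamp_count a =>
    let clamped := max 0 (min 100 (pvPos a))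
    if clamped ≠ pvPos a then clamp_count + 1 else clamp_count) 0

-- ===== PORT B =====
-- groupby over the sorted list: one entry per run of equal "at", keeping the LAST element's pos
def pvGroupLast (t p : Int) (xs : List (List (String × Int))) : List (Int × Int) :=
  match xs with
  | [] => [(t, p)]
  | b :: rest =>
      if pvAt b = t then pvGroupLast t (pvPos b) rest
      else (t, p) :: pvGroupLast (pvAt b) (pvPos b) rest

def clamp_sort_dedup_py_alt (actions : List (List (String × Int))) : Int :=
  let sortedA := PySem.List.sorted actions (fun a => pvAt a) false
  let deduped : List (Int × Int) :=
    match sortedA with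
    | [] => []
    | a :: rest => pvGroupLast (pvAt a) (pvPos a) rest
  deduped.foldl (fun clamp_count tp =>
    if tp.2 < 0 ∨ 100 < tp.2 then clamp_count + 1 else clamp_count) 0

-- ===== PRECONDITION & SPEC =====
-- Pre_: every element dict has the keys "at" and "pos" (Python A raises KeyError otherwise)
def Pre_clamp_sort_dedup_py (actions : List (List (String × Int))) : Prop :=
  ∀ a ∈ actions, (PySem.Dict.mk a).contains "at" = true ∧ (PySem.Dict.mk a).contains "pos" = true
instance (actions : List (List (String × Int))) : Decidable (Pre_clamp_sort_dedup_py actions) := by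
  unfold Pre_clamp_sort_dedup_py; infer_instance
def pvWitness_clamp_sort_dedup_py : (List (List (String × Int))) :=
  [[("at", 5), ("pos", 120)], [("at", 2), ("pos", -3)], [("at", 5), ("pos", 40)]]

def Spec_clamp_sort_dedup_py (actions : List (List (String × Int))) (out : Int) : Prop := out = clamp_sort_dedup_py_alt actions
instance (actions : List (List (String × Int))) (out : Int) : Decidable (Spec_clamp_sort_dedup_py actions out) := by unfold Spec_clamp_sort_dedup_py; infer_instance

-- ===== CLAIM (what is proved, stated in full; the proofs are below) =====
def Claim_equal_clamp_sort_dedup_py : Prop := ∀ (actions : List (List (String × Int))), Dom_clamp_sort_dedup_py actions → Pre_clamp_sort_dedup_py actions → Spec_clamp_sort_dedup_py actions (clamp_sort_dedup_py actions)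

-- ===== LEMMAS AND PROOFS =====

-- the dict built by last-wins inserts over a key-sorted run has exactly the groupby-last items
lemma pv_items_foldl_insert (xs : List (List (String × Int))) :
    ∀ (d : PySem.Dict Int Int) (t p : Int),
      xs.Pairwise (fun a b => pvAt a ≤ pvAt b) →
      (∀ y ∈ xs, t ≤ pvAt y) →
      d.contains t = false →
      (∀ y ∈ xs, d.contains (pvAt y) = false) →
      (xs.foldl (fun d a => d.insert (pvAt a) (pvPos a)) (d.insert t p)).items
        = d.items ++ pvGroupLast t p xs := by
  induction xs with
  | nil =>
      intro d t p _ _ h3 _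
      simp [pvGroupLast, PySem.Dict.items_insert_of_not_contains d p h3]
  | cons b rest ih =>
      intro d t p h1 h2 h3 h4
      rw [List.pairwise_cons] at h1
      simp only [List.foldl_cons, pvGroupLast]
      by_cases hb : pvAt b = t
      · rw [if_pos hb, hb, PySem.Dict.insert_insert_self]
        exact ih d t (pvPos b) h1.2 (fun y hy => le_of_eq_of_le hb.symm (h1.1 y hy))
          h3 (fun y hy => h4 y (List.mem_cons_of_mem _ hy))
      · rw [if_neg hb]
        have htb : t < pvAt b := lt_of_le_of_ne (h2 b (List.mem_cons_self)) (Ne.symm hb)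
        rw [ih (d.insert t p) (pvAt b) (pvPos b) h1.2 h1.1
            (by rw [PySem.Dict.contains_insert]
                simp [hb, h4 b List.mem_cons_self])
            (fun y hy => by
              rw [PySem.Dict.contains_insert]
              have : t < pvAt y := lt_of_lt_of_le htb (h1.1 y hy)
              simp [h4 y (List.mem_cons_of_mem _ hy)]
              omega)]
        rw [PySem.Dict.items_insert_of_not_contains d p h3]
        simp

-- the two per-element clamp tests agree
lemma pv_step_eq (c p : Int) :
    (if max 0 (min 100 p) ≠ p then c + 1 else c) = (if p < 0 ∨ 100 < p then c + 1 else c) := by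
  split_ifs <;> omega

-- ===== VERDICT (by name: the statement is the Claim_ definition above) =====
theorem clamp_sort_dedup_py_spec : Claim_equal_clamp_sort_dedup_py := by
  unfold Claim_equal_clamp_sort_dedup_py
  intro actions _ _
  unfold Spec_clamp_sort_dedup_py clamp_sort_dedup_py clamp_sort_dedup_py_alt
  cases hs : PySem.List.sorted actions (fun a => pvAt a) false with
  | nil => rfl
  | cons a rest =>
      have hpw : (a :: rest).Pairwise (fun x y => pvAt x ≤ pvAt y) := by
        rw [← hs]; exact PySem.List.sorted_pairwise actions (fun a => pvAt a)
      rw [List.pairwise_cons] at hpw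
      simp only [List.foldl_cons]
      rw [pv_items_foldl_insert rest PySem.Dict.empty (pvAt a) (pvPos a) hpw.2 hpw.1
            (by rfl) (fun y _ => by rfl),
          (by rfl : (PySem.Dict.empty : PySem.Dict Int Int).items = ([] : List (Int × Int)))]
      simp only [List.nil_append, List.foldl_map]
      refine List.foldl_ext _ _ 0 (fun c tp _ => ?_)
      have hp : pvPos [("at", tp.1), ("pos", tp.2)] = tp.2 := by
        simp [pvPos, PySem.Dict.getD, PySem.Dict.get?_mk_cons]
      rw [hp]
      exact pv_step_eq c tp.2
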